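-- pv_equiv track=rewrite | github.com/yl231/mh_model_edit | MQuAKE/run_mello.py | remove_extra_target_occurrences
-- ===== SOURCE A (Python) =====
-- def remove_extra_target_occurrences(gen, target, count):
--     occurrences = gen.count(target)
--
--     if occurrences <= count:
--         return gen
--
--     index = 0
--     for _ in range(count + 1):
--         index = gen.find(target, index) + len(target)
--
--     # while index < len(gen) and gen[index:].startswith(target):
--     #     index += len(target)
--
--     return gen[:index - len(target) - 2]
-- ===== SOURCE B (Python) =====
-- def remove_extra_target_occurrences(gen, target, count):
--     parts = gen.split(target)
--     if len(parts) - 1 <= count: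
--         return gen
--     prefix_len = len(target.join(parts[:count + 1]))
--     return gen[:prefix_len - 2]
-- ===== Notes on version B (the rewrite author's own statement) =====
-- stated objective: simpler
-- what changed: B splits the string once on the target and derives the cut position as the length of the first count+1 pieces rejoined, instead of A's counting pass plus a repeated-find loop walking occurrence by occurrence.
-- intended difference: On count = -1 with gen longer than 2 characters (and nonempty target) A returns the accidental slice gen[:-len(target)-2] left by its never-entered loop, while B keeps no piece and returns gen[:-2]; the allowance -1 is meaningless and B's value is as defensible as A's on this unspecified corner. — e.g. on remove_extra_target_occurrences("abcab", "ab", -1): A returns "a", B returns "abc"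
-- outside the precondition, e.g. on remove_extra_target_occurrences('abc', '', 0): A returns 'a', B raises ValueError; on remove_extra_target_occurrences('aXbXc', 'X', -2): A returns 'aX', B returns 'a'
import Mathlib
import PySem

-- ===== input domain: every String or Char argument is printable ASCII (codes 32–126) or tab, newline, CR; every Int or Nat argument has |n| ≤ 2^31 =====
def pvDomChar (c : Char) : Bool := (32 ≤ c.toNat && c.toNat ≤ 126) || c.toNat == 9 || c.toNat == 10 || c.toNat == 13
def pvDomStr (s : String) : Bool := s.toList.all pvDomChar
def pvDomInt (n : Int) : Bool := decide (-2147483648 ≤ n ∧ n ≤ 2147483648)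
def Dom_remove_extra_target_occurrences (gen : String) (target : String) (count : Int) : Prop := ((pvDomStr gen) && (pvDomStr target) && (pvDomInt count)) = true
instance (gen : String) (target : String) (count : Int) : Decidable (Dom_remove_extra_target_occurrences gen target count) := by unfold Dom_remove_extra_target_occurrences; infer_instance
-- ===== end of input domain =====

-- B computes the cut position from a single split of the string instead of A's count pass plus a repeated-find loop; objective: simpler.
-- ===== PORT A =====
def remove_extra_target_occurrences (gen : String) (target : String) (count : Int) : String :=
  let occurrences : Int := (PySem.Str.count gen target : Int)
  if occurrences ≤ count then gen
  else
    let index : Int := (PySem.List.pyRange 0 (count + 1) 1).foldl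
      (fun index _ => PySem.Str.findFrom gen target index + PySem.Str.len target) 0
    PySem.Str.slice gen none (some (index - PySem.Str.len target - 2))

-- ===== PORT B =====
def remove_extra_target_occurrences_alt (gen : String) (target : String) (count : Int) : String :=
  match PySem.Str.split? gen target with
  | none => ""  -- Python B raises ValueError here (empty separator); outside Pre_
  | some parts =>
    if (parts.length : Int) - 1 ≤ count then gen
    else
      let prefix_len : Int :=
        PySem.Str.len (PySem.Str.join target (PySem.List.slice parts none (some (count + 1))))
      PySem.Str.slice gen none (some (prefix_len - 2))

-- ===== PRECONDITION & SPEC =====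
-- Pre_ excludes the empty target, where A returns gen[:-2] while B's gen.split("") raises
-- ValueError, and count < -1, which is outside the function's natural domain (there both
-- return accidental, generally different slices).
def Pre_remove_extra_target_occurrences (gen : String) (target : String) (count : Int) : Prop :=
  target ≠ "" ∧ -1 ≤ count

instance (gen : String) (target : String) (count : Int) :
    Decidable (Pre_remove_extra_target_occurrences gen target count) := by
  unfold Pre_remove_extra_target_occurrences; infer_instance

def pvWitness_remove_extra_target_occurrences : String × String × Int := ("xAyAzA", "A", 1)

-- On count = -1 with gen longer than 2, A returns the accidental slice gen[:-len(target)-2]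
-- left over from its never-entered loop, while B keeps no piece and returns gen[:-2]; the
-- allowance -1 is meaningless and B's value is as defensible as A's on this unspecified
-- corner (for gen of length at most 2 both return "").
def D_remove_extra_target_occurrences (gen : String) (target : String) (count : Int) : Prop :=
  count = -1 ∧ 2 < gen.toList.length

instance (gen : String) (target : String) (count : Int) :
    Decidable (D_remove_extra_target_occurrences gen target count) := by
  unfold D_remove_extra_target_occurrences; infer_instance

def Spec_remove_extra_target_occurrences (gen : String) (target : String) (count : Int) (out : String) : Prop := ¬ D_remove_extra_target_occurrences gen target count → out = remove_extra_target_occurrences_alt gen target count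
instance (gen : String) (target : String) (count : Int) (out : String) : Decidable (Spec_remove_extra_target_occurrences gen target count out) := by unfold Spec_remove_extra_target_occurrences; infer_instance

def pvDiffWitness_remove_extra_target_occurrences : String × String × Int := ("abcab", "ab", -1)
def pvDiffWitnessOut_remove_extra_target_occurrences : String × String := ("a", "abc")

-- ===== CLAIM (what is proved, stated in full; the proofs are below) =====
def Claim_unchanged_remove_extra_target_occurrences : Prop := ∀ (gen : String) (target : String) (count : Int), Dom_remove_extra_target_occurrences gen target count → Pre_remove_extra_target_occurrences gen target count → Spec_remove_extra_target_occurrences gen target count (remove_extra_target_occurrences gen target count)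
def Claim_changed_remove_extra_target_occurrences : Prop := Dom_remove_extra_target_occurrences (pvDiffWitness_remove_extra_target_occurrences.1) (pvDiffWitness_remove_extra_target_occurrences.2.1) (pvDiffWitness_remove_extra_target_occurrences.2.2) ∧ Pre_remove_extra_target_occurrences (pvDiffWitness_remove_extra_target_occurrences.1) (pvDiffWitness_remove_extra_target_occurrences.2.1) (pvDiffWitness_remove_extra_target_occurrences.2.2) ∧ D_remove_extra_target_occurrences (pvDiffWitness_remove_extra_target_occurrences.1) (pvDiffWitness_remove_extra_target_occurrences.2.1) (pvDiffWitness_remove_extra_target_occurrences.2.2) ∧ remove_extra_target_occurrences (pvDiffWitness_remove_extra_target_occurrences.1) (pvDiffWitness_remove_extra_target_occurrences.2.1) (pvDiffWitness_remove_extra_target_occurrences.2.2) = pvDiffWitnessOut_remove_extra_target_occurrences.1 ∧ remove_extra_target_occurrences_alt (pvDiffWitness_remove_extra_target_occurrences.1) (pvDiffWitness_remove_extra_target_occurrences.2.1) (pvDiffWitness_remove_extra_target_occurrences.2.2) = pvDiffWitnessOut_remove_extra_target_occurrences.2 ∧ pvDiffWitnessOut_remove_extra_target_occurrences.1 ≠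 pvDiffWitnessOut_remove_extra_target_occurrences.2
def Claim_exact_remove_extra_target_occurrences : Prop := ∀ (gen : String) (target : String) (count : Int), Dom_remove_extra_target_occurrences gen target count → Pre_remove_extra_target_occurrences gen target count → D_remove_extra_target_occurrences gen target count → remove_extra_target_occurrences gen target count ≠ remove_extra_target_occurrences_alt gen target count

-- ===== LEMMAS AND PROOFS =====
-- ===== find.go =====
lemma findgo_nil (sub : List Char) (k : Nat) (h : sub ≠ []) :
    PySem.Chars.find.go sub [] k = -1 := by
  rw [PySem.Chars.find.go]; simp [List.isEmpty_iff, h]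

lemma findgo_cons (sub : List Char) (c : Char) (r : List Char) (k : Nat) :
    PySem.Chars.find.go sub (c::r) k =
      if sub.isPrefixOf (c::r) then (k:Int) else PySem.Chars.find.go sub r (k+1) := by
  rw [PySem.Chars.find.go]

lemma findgo_shift (sub : List Char) (h : sub ≠ []) :
    ∀ (l : List Char) (k : Nat), PySem.Chars.find.go sub l k =
      if PySem.Chars.find.go sub l 0 = -1 then -1 else PySem.Chars.find.go sub l 0 + k := by
  intro l
  induction l with
  | nil => intro k; simp [findgo_nil sub _ h]
  | cons c r ih =>
    intro k
    rw [findgo_cons, findgo_cons]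
    by_cases hp : sub.isPrefixOf (c::r)
    · simp [hp]
    · simp only [hp]
      rw [ih (k+1), ih 1]
      have hge : -1 ≤ PySem.Chars.find.go sub r 0 := by
        have := PySem.Chars.neg_one_le_find r sub
        simpa [PySem.Chars.find] using this
      by_cases h0 : PySem.Chars.find.go sub r 0 = -1
      · simp [h0]
      · have hne : ¬ (PySem.Chars.find.go sub r 0 + 1 = -1) := by omega
        simp only [h0, if_false]
        push_cast; omega

lemma find_nil (sub : List Char) (h : sub ≠ []) : PySem.Chars.find [] sub = -1 := by
  simp only [PySem.Chars.find]; exact findgo_nil sub 0 h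

lemma find_cons_pos (sub : List Char) (c : Char) (r : List Char)
    (hp : sub.isPrefixOf (c::r)) : PySem.Chars.find (c::r) sub = 0 := by
  simp only [PySem.Chars.find]; rw [findgo_cons]; simp [hp]

lemma find_cons_neg (sub : List Char) (h : sub ≠ []) (c : Char) (r : List Char)
    (hp : ¬ sub.isPrefixOf (c::r)) :
    PySem.Chars.find (c::r) sub =
      if PySem.Chars.find r sub = -1 then -1 else PySem.Chars.find r sub + 1 := by
  simp only [PySem.Chars.find]
  rw [findgo_cons]
  simp only [hp]
  rw [findgo_shift sub h r 1]
  norm_num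

-- ===== count.go =====
lemma countgo_nil (sub : List Char) (fuel acc : Nat) :
    PySem.Chars.count.go sub fuel [] acc = acc := by
  cases fuel <;> rw [PySem.Chars.count.go]
  simp

lemma countgo_cons (sub : List Char) (fuel : Nat) (c : Char) (r : List Char) (acc : Nat) :
    PySem.Chars.count.go sub (fuel+1) (c::r) acc =
      if sub.isPrefixOf (c::r) then PySem.Chars.count.go sub fuel ((c::r).drop sub.length) (acc+1)
      else PySem.Chars.count.go sub fuel r acc := by
  rw [PySem.Chars.count.go]

lemma sub_len_succ (sub : List Char) (h : sub ≠ []) : ∃ n, sub.length = n + 1 :=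
  ⟨sub.length - 1, by cases sub <;> simp_all⟩

lemma drop_cons_len (sub : List Char) (h : sub ≠ []) (c : Char) (r : List Char) :
    ((c::r).drop sub.length).length ≤ r.length := by
  obtain ⟨n, hn⟩ := sub_len_succ sub h
  rw [hn, List.drop_succ_cons]
  simp [List.length_drop]

lemma countgo_acc (sub : List Char) (hsub : sub ≠ []) :
    ∀ (n : Nat) (l : List Char), l.length ≤ n → ∀ (fuel acc : Nat), l.length ≤ fuel →
      PySem.Chars.count.go sub fuel l acc = acc + PySem.Chars.count.go sub l.length l 0 := by
  intro n
  induction n with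
  | zero =>
    intro l hl fuel acc hf
    have : l = [] := List.length_eq_zero_iff.mp (Nat.le_zero.mp hl)
    subst this; simp [countgo_nil]
  | succ n ih =>
    intro l hl fuel acc hf
    cases l with
    | nil => simp [countgo_nil]
    | cons c r =>
      cases fuel with
      | zero => simp at hf
      | succ f =>
        simp only [List.length_cons] at hl hf
        rw [countgo_cons]
        simp only [List.length_cons]
        rw [countgo_cons]
        by_cases hp : sub.isPrefixOf (c::r)
        · simp only [hp, if_true]
          have hd : ((c::r).drop sub.length).length ≤ r.length := drop_cons_len sub hsub c r
          rw [ih _ (by omega) f (acc+1) (by omega),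
              ih _ (by omega) r.length 1 (by omega)]
          omega
        · simp only [hp]
          rw [ih r (by omega) f acc (by omega),
              ih r (by omega) r.length 0 (by omega)]
          simp

lemma count_unfold (l sub : List Char) (h : sub ≠ []) :
    PySem.Chars.count l sub = PySem.Chars.count.go sub l.length l 0 := by
  simp [PySem.Chars.count, List.isEmpty_iff, h]

lemma count_struct (sub : List Char) (hsub : sub ≠ []) :
    ∀ (n : Nat) (l : List Char), l.length ≤ n →
      PySem.Chars.count l sub =
        if PySem.Chars.find l sub = -1 then 0
        else PySem.Chars.count (l.drop ((PySem.Chars.find l sub).toNat + sub.length)) sub + 1 := by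
  intro n
  induction n with
  | zero =>
    intro l hl
    have : l = [] := List.length_eq_zero_iff.mp (Nat.le_zero.mp hl)
    subst this
    simp [find_nil sub hsub, count_unfold _ sub hsub, countgo_nil]
  | succ n ih =>
    intro l hl
    cases l with
    | nil => simp [find_nil sub hsub, count_unfold _ sub hsub, countgo_nil]
    | cons c r =>
      simp only [List.length_cons] at hl
      by_cases hp : sub.isPrefixOf (c::r)
      · rw [find_cons_pos sub c r hp]
        norm_num
        rw [count_unfold _ sub hsub]
        simp only [List.length_cons]
        rw [countgo_cons]
        simp only [hp, if_true]
        have hd : ((c::r).drop sub.length).length ≤ r.length := drop_cons_len sub hsub c r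
        rw [countgo_acc sub hsub r.length _ (by omega) r.length 1 (by omega)]
        rw [count_unfold _ sub hsub]
        omega
      · have hcr : PySem.Chars.count (c::r) sub = PySem.Chars.count r sub := by
          rw [count_unfold _ sub hsub, count_unfold _ sub hsub]
          simp only [List.length_cons]
          rw [countgo_cons]
          simp only [hp]
          exact countgo_acc sub hsub r.length r le_rfl r.length 0 le_rfl |>.trans (by omega)
        rw [find_cons_neg sub hsub c r hp, hcr, ih r (by omega)]
        by_cases hf : PySem.Chars.find r sub = -1
        · simp [hf]
        · have hge : 0 ≤ PySem.Chars.find r sub := by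
            have := PySem.Chars.neg_one_le_find r sub; omega
          have h1 : ¬ (PySem.Chars.find r sub + 1 = -1) := by omega
          simp only [hf, if_false, h1]
          have ht : (PySem.Chars.find r sub + 1).toNat = (PySem.Chars.find r sub).toNat + 1 := by omega
          rw [ht]
          have : (PySem.Chars.find r sub).toNat + 1 + sub.length
               = ((PySem.Chars.find r sub).toNat + sub.length) + 1 := by omega
          rw [this, List.drop_succ_cons]

-- ===== splitOn.go =====
lemma splitgo_nil (sep : List Char) (fuel : Nat) (cur : List Char) (acc : List (List Char)) :
    PySem.Chars.splitOn.go sep fuel [] cur acc = (cur.reverse :: acc).reverse := by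
  cases fuel with
  | zero => rw [PySem.Chars.splitOn.go]; simp
  | succ n => rw [PySem.Chars.splitOn.go]; simp

lemma splitgo_cons (sep : List Char) (fuel : Nat) (c : Char) (r : List Char)
    (cur : List Char) (acc : List (List Char)) :
    PySem.Chars.splitOn.go sep (fuel+1) (c::r) cur acc =
      if sep.isPrefixOf (c::r) then
        PySem.Chars.splitOn.go sep fuel ((c::r).drop sep.length) [] (cur.reverse :: acc)
      else PySem.Chars.splitOn.go sep fuel r (c::cur) acc := by
  rw [PySem.Chars.splitOn.go]

lemma modHead_id (l : List (List Char)) : List.modifyHead (fun x => x) l = l := by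
  cases l <;> simp

lemma splitgo_acc (sep : List Char) (hsep : sep ≠ []) :
    ∀ (n : Nat) (l : List Char), l.length ≤ n → ∀ (fuel : Nat) (cur : List Char) (acc : List (List Char)),
      l.length ≤ fuel →
      PySem.Chars.splitOn.go sep fuel l cur acc =
        acc.reverse ++ (PySem.Chars.splitOn.go sep l.length l [] []).modifyHead (cur.reverse ++ ·) := by
  intro n
  induction n with
  | zero =>
    intro l hl fuel cur acc hf
    have : l = [] := List.length_eq_zero_iff.mp (Nat.le_zero.mp hl)
    subst this; simp [splitgo_nil]
  | succ n ih =>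
    intro l hl fuel cur acc hf
    cases l with
    | nil => simp [splitgo_nil]
    | cons c r =>
      cases fuel with
      | zero => simp at hf
      | succ f =>
        simp only [List.length_cons] at hl hf
        rw [splitgo_cons]
        simp only [List.length_cons]
        rw [splitgo_cons]
        by_cases hp : sep.isPrefixOf (c::r)
        · simp only [hp, if_true]
          have hd : ((c::r).drop sep.length).length ≤ r.length := drop_cons_len sep hsep c r
          rw [ih _ (by omega) f [] (cur.reverse :: acc) (by omega),
              ih _ (by omega) r.length [] [[].reverse] (by omega)]
          simp
        · simp only [hp]
          rw [ih r (by omega) f (c::cur) acc (by omega),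
              ih r (by omega) r.length [c] [] (by omega)]
          simp
          rfl

lemma splitOn_unfold (l sep : List Char) (hsep : sep ≠ []) :
    PySem.Chars.splitOn l sep = PySem.Chars.splitOn.go sep l.length l [] [] := by
  rw [PySem.Chars.splitOn]
  rw [splitgo_acc sep hsep (l.length+1) l (by omega) (l.length+1) [] [] (by omega)]
  simp
  cases PySem.Chars.splitOn.go sep l.length l [] [] <;> simp

lemma find_mem_spec (l sep : List Char) (hsep : sep ≠ []) (hf : ¬ PySem.Chars.find l sep = -1) :
    sep <+: l.drop (PySem.Chars.find l sep).toNat ∧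
    (PySem.Chars.find l sep).toNat + sep.length ≤ l.length := by
  have hge : 0 ≤ PySem.Chars.find l sep := by
    have := PySem.Chars.neg_one_le_find l sep; omega
  have hspec := (PySem.Chars.find_spec (s := l) (sub := sep) hge).1
  refine ⟨hspec, ?_⟩
  have hlen : sep.length ≤ (l.drop (PySem.Chars.find l sep).toNat).length := hspec.length_le
  have h1 : 1 ≤ sep.length := by cases sep <;> simp_all
  simp only [List.length_drop] at hlen
  omega

lemma split_struct (sep : List Char) (hsep : sep ≠ []) :
    ∀ (n : Nat) (l : List Char), l.length ≤ n →
      PySem.Chars.splitOn l sep =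
        if PySem.Chars.find l sep = -1 then [l]
        else l.take (PySem.Chars.find l sep).toNat ::
             PySem.Chars.splitOn (l.drop ((PySem.Chars.find l sep).toNat + sep.length)) sep := by
  intro n
  induction n with
  | zero =>
    intro l hl
    have : l = [] := List.length_eq_zero_iff.mp (Nat.le_zero.mp hl)
    subst this
    simp [find_nil sep hsep, splitOn_unfold _ sep hsep, splitgo_nil]
  | succ n ih =>
    intro l hl
    cases l with
    | nil => simp [find_nil sep hsep, splitOn_unfold _ sep hsep, splitgo_nil]
    | cons c r =>
      simp only [List.length_cons] at hl
      by_cases hp : sep.isPrefixOf (c::r)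
      · rw [find_cons_pos sep c r hp]
        norm_num
        rw [splitOn_unfold _ sep hsep]
        simp only [List.length_cons]
        rw [splitgo_cons]
        simp only [hp, if_true]
        have hd : ((c::r).drop sep.length).length ≤ r.length := drop_cons_len sep hsep c r
        rw [splitgo_acc sep hsep r.length _ (by omega) r.length [] [[].reverse] (by omega)]
        rw [splitOn_unfold _ sep hsep]
        simp
        exact modHead_id _
      · have hcr : PySem.Chars.splitOn (c::r) sep = (PySem.Chars.splitOn r sep).modifyHead (c :: ·) := by
          rw [splitOn_unfold _ sep hsep, splitOn_unfold _ sep hsep]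
          simp only [List.length_cons]
          rw [splitgo_cons]
          simp only [hp]
          rw [splitgo_acc sep hsep r.length r le_rfl r.length [c] [] le_rfl]
          simp
        rw [find_cons_neg sep hsep c r hp, hcr, ih r (by omega)]
        by_cases hf : PySem.Chars.find r sep = -1
        · simp [hf]
        · have hge : 0 ≤ PySem.Chars.find r sep := by
            have := PySem.Chars.neg_one_le_find r sep; omega
          have h1 : ¬ (PySem.Chars.find r sep + 1 = -1) := by omega
          simp only [hf, if_false, h1]
          have ht : (PySem.Chars.find r sep + 1).toNat = (PySem.Chars.find r sep).toNat + 1 := by omega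
          rw [ht]
          have h2 : (PySem.Chars.find r sep).toNat + 1 + sep.length
               = ((PySem.Chars.find r sep).toNat + sep.length) + 1 := by omega
          rw [h2, List.drop_succ_cons, List.take_succ_cons]
          simp

-- ===== derived structure =====
lemma splitOn_ne_nil (l sep : List Char) (hsep : sep ≠ []) :
    PySem.Chars.splitOn l sep ≠ [] := by
  rw [split_struct sep hsep l.length l le_rfl]
  split <;> simp

lemma split_decomp (l sep : List Char) (hsep : sep ≠ []) (hf : ¬ PySem.Chars.find l sep = -1) :
    l = l.take (PySem.Chars.find l sep).toNat ++ sep ++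
        l.drop ((PySem.Chars.find l sep).toNat + sep.length) := by
  obtain ⟨hpre, hlen⟩ := find_mem_spec l sep hsep hf
  obtain ⟨t2, ht2⟩ := hpre
  have h2 : t2 = l.drop ((PySem.Chars.find l sep).toNat + sep.length) := by
    have := congrArg (List.drop sep.length) ht2
    rw [List.drop_drop, List.drop_left] at this
    rw [← this]
  rw [← h2]
  conv_lhs => rw [← List.take_append_drop (PySem.Chars.find l sep).toNat l, ← ht2]
  simp

lemma length_splitOn (sep : List Char) (hsep : sep ≠ []) :
    ∀ (n : Nat) (l : List Char), l.length ≤ n →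
      (PySem.Chars.splitOn l sep).length = PySem.Chars.count l sep + 1 := by
  intro n
  induction n with
  | zero =>
    intro l hl
    have : l = [] := List.length_eq_zero_iff.mp (Nat.le_zero.mp hl)
    subst this
    rw [split_struct sep hsep 0 [] le_rfl, count_struct sep hsep 0 [] le_rfl]
    simp [find_nil sep hsep]
  | succ n ih =>
    intro l hl
    rw [split_struct sep hsep l.length l le_rfl, count_struct sep hsep l.length l le_rfl]
    by_cases hf : PySem.Chars.find l sep = -1
    · simp [hf]
    · simp only [hf, if_false]
      obtain ⟨_, hlen⟩ := find_mem_spec l sep hsep hf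
      have h1 : 1 ≤ sep.length := by cases sep <;> simp_all
      have hd : (l.drop ((PySem.Chars.find l sep).toNat + sep.length)).length ≤ n := by
        simp [List.length_drop]; omega
      simp [ih _ hd]

lemma join_splitOn (sep : List Char) (hsep : sep ≠ []) :
    ∀ (n : Nat) (l : List Char), l.length ≤ n →
      PySem.Chars.join sep (PySem.Chars.splitOn l sep) = l := by
  intro n
  induction n with
  | zero =>
    intro l hl
    have : l = [] := List.length_eq_zero_iff.mp (Nat.le_zero.mp hl)
    subst this
    rw [split_struct sep hsep 0 [] le_rfl]
    simp [find_nil sep hsep, PySem.Chars.join_singleton]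
  | succ n ih =>
    intro l hl
    rw [split_struct sep hsep l.length l le_rfl]
    by_cases hf : PySem.Chars.find l sep = -1
    · simp [hf, PySem.Chars.join_singleton]
    · simp only [hf, if_false]
      obtain ⟨_, hlen⟩ := find_mem_spec l sep hsep hf
      have h1 : 1 ≤ sep.length := by cases sep <;> simp_all
      set d := l.drop ((PySem.Chars.find l sep).toNat + sep.length) with hd
      have hdn : d.length ≤ n := by rw [hd]; simp [List.length_drop]; omega
      obtain ⟨q, qs, hq⟩ := List.exists_cons_of_ne_nil (splitOn_ne_nil d sep hsep)
      rw [hq, PySem.Chars.join_cons_cons, ← hq, ih d hdn]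
      exact (split_decomp l sep hsep hf).symm

lemma splitOn_join_drop (sep : List Char) (hsep : sep ≠ []) :
    ∀ (k : Nat) (l : List Char), k ≤ PySem.Chars.count l sep →
      PySem.Chars.splitOn (PySem.Chars.join sep ((PySem.Chars.splitOn l sep).drop k)) sep
        = (PySem.Chars.splitOn l sep).drop k := by
  intro k
  induction k with
  | zero =>
    intro l _
    simp [join_splitOn sep hsep l.length l le_rfl]
  | succ k ih =>
    intro l hk
    have hf : ¬ PySem.Chars.find l sep = -1 := by
      intro hf
      rw [count_struct sep hsep l.length l le_rfl] at hk
      simp [hf] at hk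
    rw [split_struct sep hsep l.length l le_rfl]
    simp only [hf, if_false, List.drop_succ_cons]
    rw [count_struct sep hsep l.length l le_rfl] at hk
    simp only [hf, if_false] at hk
    exact ih _ (by omega)

-- cut-position bookkeeping (proof helper)
def pvDL (sep : List Char) : List (List Char) → Nat → Nat
  | _, 0 => 0
  | [], _+1 => 0
  | p :: rest, k+1 => p.length + sep.length + pvDL sep rest k

lemma pvDL_zero (sep : List Char) (l : List (List Char)) : pvDL sep l 0 = 0 := by
  cases l <;> rfl

lemma pvDL_cons_succ (sep : List Char) (p : List Char) (rest : List (List Char)) (k : Nat) :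
    pvDL sep (p::rest) (k+1) = p.length + sep.length + pvDL sep rest k := rfl

lemma drop_pvDL (sep : List Char) (hsep : sep ≠ []) :
    ∀ (k : Nat) (l : List Char), k ≤ PySem.Chars.count l sep →
      pvDL sep (PySem.Chars.splitOn l sep) k ≤ l.length ∧
      l.drop (pvDL sep (PySem.Chars.splitOn l sep) k)
        = PySem.Chars.join sep ((PySem.Chars.splitOn l sep).drop k) := by
  intro k
  induction k with
  | zero =>
    intro l _
    refine ⟨by simp [pvDL_zero], ?_⟩
    simp [pvDL_zero, join_splitOn sep hsep l.length l le_rfl]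
  | succ k ih =>
    intro l hk
    have hf : ¬ PySem.Chars.find l sep = -1 := by
      intro hf
      rw [count_struct sep hsep l.length l le_rfl] at hk
      simp [hf] at hk
    obtain ⟨_, hlen⟩ := find_mem_spec l sep hsep hf
    have h1 : 1 ≤ sep.length := by cases sep <;> simp_all
    have hcnt : k ≤ PySem.Chars.count (l.drop ((PySem.Chars.find l sep).toNat + sep.length)) sep := by
      rw [count_struct sep hsep l.length l le_rfl] at hk
      simp only [hf, if_false] at hk
      omega
    obtain ⟨ihb, ihe⟩ := ih _ hcnt
    rw [split_struct sep hsep l.length l le_rfl]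
    simp only [hf, if_false, List.drop_succ_cons]
    rw [pvDL_cons_succ]
    have hjl : (l.take (PySem.Chars.find l sep).toNat).length = (PySem.Chars.find l sep).toNat := by
      simp [List.length_take]
      omega
    rw [hjl]
    refine ⟨?_, ?_⟩
    · have hd2 : (l.drop ((PySem.Chars.find l sep).toNat + sep.length)).length
          = l.length - ((PySem.Chars.find l sep).toNat + sep.length) := by simp
      omega
    · rw [← List.drop_drop, ihe]

lemma pvDL_succ (sep : List Char) :
    ∀ (k : Nat) (parts : List (List Char)), k < parts.length →
      pvDL sep parts (k+1) = pvDL sep parts k + (parts.getD k []).length + sep.length := by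
  intro k
  induction k with
  | zero =>
    intro parts hk
    cases parts with
    | nil => simp at hk
    | cons p rest => simp [pvDL_zero, pvDL_cons_succ]
  | succ k ih =>
    intro parts hk
    cases parts with
    | nil => simp at hk
    | cons p rest =>
      simp only [List.length_cons] at hk
      rw [pvDL_cons_succ, pvDL_cons_succ, ih rest (by omega)]
      simp only [List.getD_cons_succ]
      omega

lemma pvDL_join (sep : List Char) :
    ∀ (k : Nat) (parts : List (List Char)), k < parts.length →
      pvDL sep parts (k+1)
        = (PySem.Chars.join sep (parts.take (k+1))).length + sep.length := by
  intro k
  induction k with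
  | zero =>
    intro parts hk
    cases parts with
    | nil => simp at hk
    | cons p rest =>
      simp [pvDL_zero, pvDL_cons_succ, PySem.Chars.join_singleton]
  | succ k ih =>
    intro parts hk
    cases parts with
    | nil => simp at hk
    | cons p rest =>
      simp only [List.length_cons] at hk
      cases rest with
      | nil => simp at hk
      | cons q rest' =>
        rw [pvDL_cons_succ]
        rw [ih (q::rest') (by simpa using hk)]
        have : (p :: q :: rest').take (k+1+1) = p :: ((q::rest').take (k+1)) := by
          simp [List.take_succ_cons]
        rw [this]
        have h2 : ∃ z zs, (q::rest').take (k+1) = z :: zs := ⟨q, rest'.take k, by simp⟩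
        obtain ⟨z, zs, hz⟩ := h2
        rw [hz, PySem.Chars.join_cons_cons, ← hz]
        simp
        omega

lemma find_step (sep : List Char) (hsep : sep ≠ []) (l : List Char) (k : Nat)
    (hk : k < PySem.Chars.count l sep) :
    PySem.Chars.find (l.drop (pvDL sep (PySem.Chars.splitOn l sep) k)) sep
      = (((PySem.Chars.splitOn l sep).getD k []).length : Int) := by
  have hu : l.drop (pvDL sep (PySem.Chars.splitOn l sep) k)
      = PySem.Chars.join sep ((PySem.Chars.splitOn l sep).drop k) :=
    (drop_pvDL sep hsep k l (le_of_lt hk)).2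
  have hR := splitOn_join_drop sep hsep k l (le_of_lt hk)
  have hlenp : (PySem.Chars.splitOn l sep).length = PySem.Chars.count l sep + 1 :=
    length_splitOn sep hsep l.length l le_rfl
  have hklen : k < (PySem.Chars.splitOn l sep).length := by omega
  have hdk : (PySem.Chars.splitOn l sep).drop k
      = (PySem.Chars.splitOn l sep).getD k [] :: (PySem.Chars.splitOn l sep).drop (k+1) := by
    rw [List.getD_eq_getElem _ _ hklen]
    exact List.drop_eq_getElem_cons hklen
  have hs := split_struct sep hsep (PySem.Chars.join sep ((PySem.Chars.splitOn l sep).drop k)).length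
      (PySem.Chars.join sep ((PySem.Chars.splitOn l sep).drop k)) le_rfl
  rw [hu]
  set u := PySem.Chars.join sep ((PySem.Chars.splitOn l sep).drop k) with hudef
  set parts := PySem.Chars.splitOn l sep with hpdef
  by_cases hf : PySem.Chars.find u sep = -1
  · exfalso
    have hcomb : parts.drop k = [u] := by
      rw [← hR, hs, if_pos hf]
    have hlc := congrArg List.length hcomb
    simp only [List.length_drop, List.length_cons, List.length_nil] at hlc
    omega
  · have hcomb : parts.getD k [] :: parts.drop (k+1)
        = u.take (PySem.Chars.find u sep).toNat ::
          PySem.Chars.splitOn (u.drop ((PySem.Chars.find u sep).toNat + sep.length)) sep := by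
      rw [← hdk, ← hR, hs, if_neg hf]
    have hhead : parts.getD k [] = u.take (PySem.Chars.find u sep).toNat :=
      (List.cons_eq_cons.mp hcomb).1
    obtain ⟨_, hlen3⟩ := find_mem_spec u sep hsep hf
    have hge : 0 ≤ PySem.Chars.find u sep := by
      have := PySem.Chars.neg_one_le_find u sep
      omega
    have htake : (u.take (PySem.Chars.find u sep).toNat).length
        = (PySem.Chars.find u sep).toNat := by
      simp [List.length_take]
      omega
    rw [hhead, htake]
    exact (Int.toNat_of_nonneg hge).symm

lemma loop_pvDL (sep : List Char) (hsep : sep ≠ []) (l : List Char) :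
    ∀ (k : Nat), k ≤ PySem.Chars.count l sep →
      (fun (i : Int) => PySem.Chars.findFrom l sep i none + sep.length)^[k] 0
        = (pvDL sep (PySem.Chars.splitOn l sep) k : Int) := by
  intro k
  induction k with
  | zero => simp [pvDL_zero]
  | succ k ih =>
    intro hk
    have hk' : k ≤ PySem.Chars.count l sep := by omega
    rw [Function.iterate_succ_apply', ih hk']
    have hb := (drop_pvDL sep hsep k l hk').1
    rw [PySem.Chars.findFrom_natCast l sep (pvDL sep (PySem.Chars.splitOn l sep) k) hb]
    rw [find_step sep hsep l k (by omega)]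
    have hlenp : (PySem.Chars.splitOn l sep).length = PySem.Chars.count l sep + 1 :=
      length_splitOn sep hsep l.length l le_rfl
    have hni : ¬ ((((PySem.Chars.splitOn l sep).getD k []).length : Int) = -1) := by omega
    rw [if_neg hni]
    rw [pvDL_succ sep k (PySem.Chars.splitOn l sep) (by omega)]
    push_cast
    ring

lemma foldl_const {α β : Type} (f : β → β) :
    ∀ (l : List α) (a : β), List.foldl (fun x _ => f x) a l = f^[l.length] a := by
  intro l
  induction l with
  | nil => intro a; simp
  | cons c r ih =>
    intro a
    simp only [List.foldl_cons, List.length_cons]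
    rw [ih (f a), Function.iterate_succ_apply]

lemma pyRange_len (count : Int) (h : 0 ≤ count) :
    (PySem.List.pyRange 0 (count+1) 1).length = count.toNat + 1 := by
  rw [PySem.List.pyRange_of_pos 0 (count+1) (by norm_num)]
  have h1 : (0:Int) < count + 1 := by omega
  simp only [h1, if_pos]
  have e : count + 1 - 0 + 1 - 1 = count + 1 := by ring
  rw [e]
  simp
  omega

theorem ports_agree (gen : String) (target : String) (count : Int)
    (hne : target ≠ "") (h0 : 0 ≤ count) :
    remove_extra_target_occurrences gen target count
      = remove_extra_target_occurrences_alt gen target count := by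
  have ht : target.toList ≠ [] := by
    intro h
    apply hne
    cases target
    simp_all
  have hsplit : PySem.Str.split? gen target
      = some ((PySem.Chars.splitOn gen.toList target.toList).map String.ofList) := by
    simp [PySem.Str.split?, PySem.Chars.split?, List.isEmpty_iff, ht]
  have hcnt : PySem.Str.count gen target = PySem.Chars.count gen.toList target.toList :=
    PySem.Str.count_eq gen target
  have hlenp : (PySem.Chars.splitOn gen.toList target.toList).length
      = PySem.Chars.count gen.toList target.toList + 1 :=
    length_splitOn target.toList ht gen.toList.length gen.toList le_rfl
  rw [remove_extra_target_occurrences, remove_extra_target_occurrences_alt, hsplit]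
  simp only [hcnt, List.length_map, hlenp]
  by_cases hm : ((PySem.Chars.count gen.toList target.toList : Int)) ≤ count
  · rw [if_pos hm, if_pos (by push_cast; omega)]
  · rw [if_neg hm, if_neg (by push_cast; omega)]
    -- both sides are a slice of gen; show the two Int bounds agree
    have hc1 : count.toNat + 1 ≤ PySem.Chars.count gen.toList target.toList := by omega
    have hfun : (fun (index : Int) (_ : Int) =>
          PySem.Str.findFrom gen target index + PySem.Str.len target)
        = (fun (index : Int) (_ : Int) =>
          PySem.Chars.findFrom gen.toList target.toList index none + (target.toList.length : Int)) := by
      funext i x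
      simp [PySem.Str.findFrom_eq, PySem.Str.len_eq]
    rw [hfun, foldl_const (fun i => PySem.Chars.findFrom gen.toList target.toList i none + (target.toList.length : Int)) _ 0,
        pyRange_len count h0,
        loop_pvDL target.toList ht gen.toList (count.toNat + 1) hc1]
    rw [pvDL_join target.toList count.toNat (PySem.Chars.splitOn gen.toList target.toList) (by omega)]
    -- B side bound
    rw [PySem.List.slice_to _ (by omega : (0:Int) ≤ count + 1)]
    have htn : (count + 1).toNat = count.toNat + 1 := by omega
    rw [htn]
    rw [← List.map_take]
    have hjoin : (PySem.Str.join target (((PySem.Chars.splitOn gen.toList target.toList).take (count.toNat+1)).map String.ofList)).toList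
        = PySem.Chars.join target.toList ((PySem.Chars.splitOn gen.toList target.toList).take (count.toNat+1)) := by
      rw [PySem.Str.toList_join]
      congr 1
      rw [List.map_map]
      have hco : String.toList ∘ String.ofList = id := funext (fun x => by simp)
      rw [hco, List.map_id]
    simp only [PySem.Str.len_eq]
    rw [hjoin]
    have hbound : (((PySem.Chars.join target.toList ((PySem.Chars.splitOn gen.toList target.toList).take (count.toNat+1))).length + target.toList.length : Nat) : Int) - (target.toList.length : Int) - 2
        = ((PySem.Chars.join target.toList ((PySem.Chars.splitOn gen.toList target.toList).take (count.toNat+1))).length : Int) - 2 := by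
      push_cast
      ring
    rw [hbound]

-- ===== VERDICT (by name: the statements are the Claim_ definitions above) =====
lemma str_slice_nonpos (s : String) (x : Int) (h : x + (s.toList.length : Int) ≤ 0) :
    PySem.Str.slice s none (some x) = "" := by
  have htl : (PySem.Str.slice s none (some x)).toList = [] := by
    rw [PySem.Str.toList_slice, PySem.Chars.slice_eq_listSlice]
    by_cases hx : 0 ≤ x
    · rw [PySem.List.slice_to _ hx]
      have h0 : s.toList = [] := List.length_eq_zero_iff.mp (by omega)
      simp [h0]
    · replace hx : x < 0 := by omega
      have hk : x = -((((-x).toNat : Nat)) : Int) := by omega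
      rw [hk, PySem.List.slice_to_neg_natCast _ ((-x).toNat) (by omega)]
      have h0 : s.toList.length - (-x).toNat = 0 := by omega
      rw [h0]
      simp
  cases hres : PySem.Str.slice s none (some x)
  simp_all

lemma portA_neg1_val (gen target : String) :
    remove_extra_target_occurrences gen target (-1)
      = PySem.Str.slice gen none (some (0 - PySem.Str.len target - 2)) := by
  have hrange : PySem.List.pyRange 0 ((-1) + 1) 1 = [] := by
    rw [PySem.List.pyRange_of_pos 0 ((-1)+1) (by norm_num)]
    simp
  rw [remove_extra_target_occurrences]
  rw [if_neg (by omega)]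
  simp only [hrange, List.foldl_nil]

lemma portB_neg1_val (gen target : String) (ht : target ≠ "") :
    remove_extra_target_occurrences_alt gen target (-1)
      = PySem.Str.slice gen none (some (0 - 2)) := by
  have htl : target.toList ≠ [] := by
    intro h
    apply ht
    cases target
    simp_all
  have hsplit : PySem.Str.split? gen target
      = some ((PySem.Chars.splitOn gen.toList target.toList).map String.ofList) := by
    simp [PySem.Str.split?, PySem.Chars.split?, List.isEmpty_iff, htl]
  have hplen : 1 ≤ (PySem.Chars.splitOn gen.toList target.toList).length := by
    rcases hsp : PySem.Chars.splitOn gen.toList target.toList with _|⟨p,ps⟩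
    · exact absurd hsp (splitOn_ne_nil _ _ htl)
    · simp
  have hsl : PySem.List.slice ((PySem.Chars.splitOn gen.toList target.toList).map String.ofList)
      none (some ((-1) + 1)) = [] := by
    rw [show ((-1):Int) + 1 = 0 from rfl, PySem.List.slice_to _ le_rfl]
    simp
  have hj : PySem.Str.len (PySem.Str.join target
      (PySem.List.slice ((PySem.Chars.splitOn gen.toList target.toList).map String.ofList)
        none (some ((-1) + 1)))) = 0 := by
    rw [hsl, PySem.Str.len_eq, PySem.Str.toList_join]
    simp [PySem.Chars.join_nil]
  rw [remove_extra_target_occurrences_alt, hsplit]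
  simp only [List.length_map]
  rw [if_neg (by omega)]
  show PySem.Str.slice gen none (some (PySem.Str.len (PySem.Str.join target
      (PySem.List.slice ((PySem.Chars.splitOn gen.toList target.toList).map String.ofList)
        none (some ((-1) + 1)))) - 2)) = PySem.Str.slice gen none (some (0 - 2))
  rw [hj]

lemma ports_agree_neg1 (gen target : String) (ht : target ≠ "")
    (hlen : gen.toList.length ≤ 2) :
    remove_extra_target_occurrences gen target (-1)
      = remove_extra_target_occurrences_alt gen target (-1) := by
  have htl : target.toList ≠ [] := by
    intro h
    apply ht
    cases target
    simp_all
  have h1 : 1 ≤ target.toList.length := by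
    rcases hx : target.toList with _|⟨c,r⟩
    · exact absurd hx htl
    · simp
  rw [portA_neg1_val gen target, portB_neg1_val gen target ht]
  rw [str_slice_nonpos gen _ (by rw [PySem.Str.len_eq]; omega),
      str_slice_nonpos gen _ (by omega)]

theorem remove_extra_target_occurrences_spec : Claim_unchanged_remove_extra_target_occurrences := by
  intro gen target count _hdom hpre hnd
  unfold D_remove_extra_target_occurrences at hnd
  unfold Pre_remove_extra_target_occurrences at hpre
  obtain ⟨ht, hcge⟩ := hpre
  by_cases hc : 0 ≤ count
  · exact ports_agree gen target count ht hc
  · have hc1 : count = -1 := by omega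
    subst hc1
    have hg : gen.toList.length ≤ 2 := by
      by_contra hg
      exact hnd ⟨rfl, by omega⟩
    exact ports_agree_neg1 gen target ht hg

theorem remove_extra_target_occurrences_changed : Claim_changed_remove_extra_target_occurrences := by
  unfold Claim_changed_remove_extra_target_occurrences
  decide

theorem remove_extra_target_occurrences_tight : Claim_exact_remove_extra_target_occurrences := by
  intro gen target count _hdom hpre hd
  unfold D_remove_extra_target_occurrences at hd
  unfold Pre_remove_extra_target_occurrences at hpre
  obtain ⟨hc1, hglen⟩ := hd
  obtain ⟨ht, _⟩ := hpre
  subst hc1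
  have htl : target.toList ≠ [] := by
    intro h
    apply ht
    cases target
    simp_all
  have h1 : 1 ≤ target.toList.length := by
    rcases hx : target.toList with _|⟨c,r⟩
    · exact absurd hx htl
    · simp
  rw [portA_neg1_val gen target, portB_neg1_val gen target ht]
  intro heq
  have hlistA : (PySem.Str.slice gen none (some (0 - PySem.Str.len target - 2))).toList
      = gen.toList.take (gen.toList.length - (target.toList.length + 2)) := by
    rw [PySem.Str.toList_slice, PySem.Chars.slice_eq_listSlice]
    have hx : (0 : Int) - PySem.Str.len target - 2
        = -(((target.toList.length + 2 : Nat)) : Int) := by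
      rw [PySem.Str.len_eq]
      push_cast
      ring
    rw [hx, PySem.List.slice_to_neg_natCast _ (target.toList.length + 2) (by omega)]
  have hlistB : (PySem.Str.slice gen none (some ((0:Int) - 2))).toList
      = gen.toList.take (gen.toList.length - 2) := by
    rw [PySem.Str.toList_slice, PySem.Chars.slice_eq_listSlice]
    have hx : (0 : Int) - 2 = -(((2 : Nat)) : Int) := by norm_num
    rw [hx, PySem.List.slice_to_neg_natCast _ 2 (by omega)]
  have hlens := congrArg (fun (s : String) => s.toList.length) heq
  simp only [hlistA, hlistB, List.length_take] at hlens
  omega
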